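-- pv_equiv track=rewrite | github.com/carlzimmerman/zimmerman-formula | research/proof_attempt/generating_function_attack.py | G_n
-- ===== SOURCE A (Python) =====
-- def C(n, k, memo={}):
--     """Divisor chains of length k from n."""
--     if (n, k) in memo:
--         return memo[(n, k)]
--     if k == 0:
--         return 1
--     if n < 2:
--         return 0
--     total = 0
--     for d in range(2, n + 1):
--         total += C(n // d, k - 1, memo)
--     memo[(n, k)] = total
--     return total
--
-- def G_n(n, x):
--     """Generating function G_n(x) = Σ_k C(n,k) x^k"""
--     total = 0
--     for k in range(30):
--         c = C(n, k)
--         if c == 0 and k > 0: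
--             break
--         total += c * (x ** k)
--     return total
-- ===== SOURCE B (Python) =====
-- def G_n(n, x):
--     """Generating function G_n(x) = sum_k C(n,k) x^k, with divisor-block
--     grouping: the sum over d of C(n//d, k-1) is taken over the O(sqrt(n))
--     distinct quotient values q = n//d, each weighted by its multiplicity."""
--     memo = {}
--
--     def chains(m, k):
--         # number of divisor chains of length k from m
--         if k == 0:
--             return 1
--         key = (m, k)
--         if key in memo:
--             return memo[key]
--         total = 0
--         d = 2
--         while d <= m:  # invariant: d >= 2
--             q = m // d
--             nxt = m // q + 1          # first d' with m // d' < q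
--             total += (nxt - d) * chains(q, k - 1)
--             d = nxt
--         memo[key] = total
--         return total
--
--     result = 0
--     for k in range(30):
--         c = chains(n, k)
--         if c == 0 and k > 0:
--             break
--         result += c * x ** k
--     return result
-- ===== Notes on version B (the rewrite author's own statement) =====
-- stated objective: faster
-- what changed: The inner per-state sum over every divisor d in 2..n of C(n//d,k-1) is replaced by divisor-block grouping: iterate only over the O(sqrt(n)) distinct quotient values q = n//d, weighting each by the size of its block of divisors.
import Mathlib
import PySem

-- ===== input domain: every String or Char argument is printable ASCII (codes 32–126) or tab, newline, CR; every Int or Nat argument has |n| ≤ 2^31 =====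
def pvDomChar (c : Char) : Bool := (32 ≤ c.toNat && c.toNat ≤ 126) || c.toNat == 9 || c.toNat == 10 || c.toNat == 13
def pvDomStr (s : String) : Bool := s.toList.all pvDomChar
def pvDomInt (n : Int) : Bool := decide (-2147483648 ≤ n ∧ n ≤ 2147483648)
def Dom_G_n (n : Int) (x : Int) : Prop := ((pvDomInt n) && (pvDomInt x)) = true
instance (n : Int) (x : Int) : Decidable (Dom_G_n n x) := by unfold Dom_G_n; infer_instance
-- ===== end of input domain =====

-- B replaces A's per-state sum over EVERY d in 2..n by divisor-block grouping over the
-- distinct quotients q = n//d with multiplicities (measured faster on large n).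
-- A's `memo` dict is a pure cache (it never changes any returned value); both ports
-- transcribe the underlying recursion without the cache.

-- ===== PORT A =====
-- C(n, k): for k > 0 and n ≥ 2, sum C(n//d, k-1) over d in range(2, n+1)
def C_A (n : Int) : Nat → Int
  | 0 => 1
  | k + 1 =>
    if n < 2 then 0
    else (PySem.List.pyRange 2 (n + 1) 1).foldl
           (fun total d => total + C_A (PySem.Int.floordiv n d) k) 0

-- the `for k in range(30)` loop with its `break`
def GA_go (n x : Int) : Nat → Int → Int
  | k, total =>
    if _h : k < 30 then
      let c := C_A n k
      if c = 0 ∧ k > 0 then total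
      else GA_go n x (k + 1) (total + c * x ^ k)
    else total
  termination_by k => 30 - k

def G_n (n : Int) (x : Int) : Int := GA_go n x 0 0

-- ===== PORT B =====
-- the `while d <= m` block loop of Source B's `chains` (f = chains(·, k-1)); the guard
-- adds the loop invariant `2 ≤ d` (always true in Source B, where d starts at 2 and grows)
-- only so the loop is total on all of Int.
def blockLoop (f : Int → Int) (m : Int) (d : Int) : Int :=
  if _h : 2 ≤ d ∧ d ≤ m then
    let q := PySem.Int.floordiv m d
    let nxt := PySem.Int.floordiv m q + 1
    (nxt - d) * f q + blockLoop f m nxt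
  else 0
  termination_by (m + 1 - d).toNat
  decreasing_by
    have hq : 1 ≤ PySem.Int.floordiv m d := by
      rw [PySem.Int.le_floordiv_iff_mul_le (by omega)]; omega
    have h1 : PySem.Int.floordiv m d * d ≤ m :=
      (PySem.Int.le_floordiv_iff_mul_le (by omega)).mp le_rfl
    have hd : d ≤ PySem.Int.floordiv m (PySem.Int.floordiv m d) := by
      rw [PySem.Int.le_floordiv_iff_mul_le (by omega), mul_comm]; exact h1
    omega

-- Source B's `chains` (the memo is a pure cache, not transcribed)
def C_B (m : Int) : Nat → Int
  | 0 => 1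
  | k + 1 => blockLoop (fun q => C_B q k) m 2

-- Source B's result loop (same shape as A's outer loop; the change is inside `chains`)
def GB_go (n x : Int) : Nat → Int → Int
  | k, result =>
    if _h : k < 30 then
      let c := C_B n k
      if c = 0 ∧ k > 0 then result
      else GB_go n x (k + 1) (result + c * x ^ k)
    else result
  termination_by k => 30 - k

def G_n_alt (n : Int) (x : Int) : Int := GB_go n x 0 0

-- ===== PRECONDITION & SPEC =====
def Spec_G_n (n : Int) (x : Int) (out : Int) : Prop := out = G_n_alt n x
instance (n : Int) (x : Int) (out : Int) : Decidable (Spec_G_n n x out) := by unfold Spec_G_n; infer_instance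

-- ===== CLAIM (what is proved, stated in full; the proofs are below) =====
def Claim_equal_G_n : Prop := ∀ (n : Int) (x : Int), Dom_G_n n x → Spec_G_n n x (G_n n x)

-- ===== LEMMAS AND PROOFS =====

-- all e in the block [d, m//(m//d)] share the quotient m//e = m//d
lemma floordiv_const_on_block (m d e : Int) (h2 : 2 ≤ d) (hdm : d ≤ m)
    (hde : d ≤ e) (he : e ≤ PySem.Int.floordiv m (PySem.Int.floordiv m d)) :
    PySem.Int.floordiv m e = PySem.Int.floordiv m d := by
  set q := PySem.Int.floordiv m d with hq
  have hq1 : 1 ≤ q := by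
    rw [hq, PySem.Int.le_floordiv_iff_mul_le (by omega)]; omega
  have hqd := (PySem.Int.floordiv_eq_iff_of_pos (a := m) (b := d) (q := q) (by omega)).mp hq.symm
  rw [PySem.Int.floordiv_eq_iff_of_pos (by omega)]
  constructor
  · have := (PySem.Int.le_floordiv_iff_mul_le (a := m) (b := q) (q := e) (by omega)).mp he
    nlinarith
  · nlinarith [hqd.2]

-- blockLoop computes the plain sum of f (m // e) over e in range(d, m+1)
lemma blockLoop_eq_sum (f : Int → Int) (m : Int) : ∀ d : Int, 2 ≤ d →
    blockLoop f m d
      = ((PySem.List.pyRange d (m + 1) 1).map (fun e => f (PySem.Int.floordiv m e))).sum := by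
  intro d
  induction d using blockLoop.induct (m := m) with
  | case1 d h q nxt ih =>
    intro h2
    simp only [q, nxt] at ih
    obtain ⟨-, hdm⟩ := h
    have hq1 : 1 ≤ PySem.Int.floordiv m d := by
      rw [PySem.Int.le_floordiv_iff_mul_le (by omega)]; omega
    have hqd : PySem.Int.floordiv m d * d ≤ m :=
      (PySem.Int.le_floordiv_iff_mul_le (by omega)).mp le_rfl
    have hdq : d ≤ PySem.Int.floordiv m (PySem.Int.floordiv m d) := by
      rw [PySem.Int.le_floordiv_iff_mul_le (by omega), mul_comm]; exact hqd
    have hqm : PySem.Int.floordiv m (PySem.Int.floordiv m d) ≤ m := by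
      have := (PySem.Int.floordiv_lt_iff_lt_mul
        (a := m) (b := PySem.Int.floordiv m d) (q := m + 1) (by omega)).mpr (by nlinarith)
      omega
    have hunf : blockLoop f m d
        = (PySem.Int.floordiv m (PySem.Int.floordiv m d) + 1 - d) * f (PySem.Int.floordiv m d)
          + blockLoop f m (PySem.Int.floordiv m (PySem.Int.floordiv m d) + 1) := by
      rw [blockLoop, dif_pos (⟨h2, hdm⟩ : (2:ℤ) ≤ d ∧ d ≤ m)]
    rw [hunf]
    rw [PySem.List.pyRange_one_append d (PySem.Int.floordiv m (PySem.Int.floordiv m d) + 1)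
          (m + 1) (by omega) (by omega),
        List.map_append, List.sum_append, ih (by omega)]
    congr 1
    have hconst : (PySem.List.pyRange d (PySem.Int.floordiv m (PySem.Int.floordiv m d) + 1) 1).map
          (fun e => f (PySem.Int.floordiv m e))
        = (PySem.List.pyRange d (PySem.Int.floordiv m (PySem.Int.floordiv m d) + 1) 1).map
          (fun _ => f (PySem.Int.floordiv m d)) := by
      apply List.map_congr_left
      intro e he
      rw [PySem.List.mem_pyRange_one] at he
      rw [floordiv_const_on_block m d e h2 hdm he.1 (by omega)]
    rw [hconst, PySem.List.sum_map_const_int, PySem.List.length_pyRange_one,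
        Int.toNat_of_nonneg (by omega)]
  | case2 d h =>
    intro h2
    rw [blockLoop, dif_neg h, PySem.List.pyRange_one_eq_nil (by omega)]
    simp

-- the two chain counters agree
lemma C_eq (k : Nat) : ∀ n : Int, C_A n k = C_B n k := by
  induction k with
  | zero => intro n; rfl
  | succ k ih =>
    intro n
    rw [C_A, C_B, blockLoop_eq_sum _ n 2 le_rfl]
    by_cases hn : n < 2
    · rw [if_pos hn, PySem.List.pyRange_one_eq_nil (by omega)]; simp
    · rw [if_neg hn, PySem.List.foldl_add]
      simp only [zero_add]
      congr 1
      apply List.map_congr_left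
      intro e _
      exact ih _

lemma go_eq (n x : Int) : ∀ (k : Nat) (t : Int), GA_go n x k t = GB_go n x k t := by
  intro k t
  induction k, t using GA_go.induct n x with
  | case1 k t h c hc =>
    rw [GA_go, GB_go]
    simp only [dif_pos h]
    have hc' : C_A n k = 0 ∧ k > 0 := hc
    rw [if_pos hc', if_pos (⟨by rw [← C_eq k n]; exact hc'.1, hc'.2⟩ : C_B n k = 0 ∧ k > 0)]
  | case2 k t h c hc ih =>
    rw [GA_go, GB_go]
    simp only [dif_pos h]
    have hc' : ¬(C_A n k = 0 ∧ k > 0) := hc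
    rw [if_neg hc', if_neg (show ¬(C_B n k = 0 ∧ k > 0) by rw [← C_eq k n]; exact hc')]
    rw [← C_eq k n]
    exact ih
  | case3 k t h =>
    rw [GA_go, GB_go]
    simp only [dif_neg h]

-- ===== VERDICT (by name: the statement is the Claim_ definition above) =====
theorem G_n_spec : Claim_equal_G_n := by
  intro n x _
  unfold Spec_G_n G_n G_n_alt
  exact go_eq n x 0 0
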